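-- pv_equiv track=rewrite | github.com/Laixk-001/LLM_learning | BPE.py | tokenize_word
-- ===== SOURCE A (Python) =====
-- def tokenize_word(word,tokenizer):
--     tokens = []
--     while word:
--         found = False
--         for i in range(len(word),0,-1):
--             subword = word[:i]
--             if subword in tokenizer:
--                 tokens.append(subword)
--                 word = word[i:]
--                 found = True
--                 break
--         if not found:
--             tokens.append(word[0])
--             word = word[1:]
--     return tokens
-- ===== SOURCE B (Python) =====
-- def tokenize_word(word, tokenizer):
--     vocab = set(tokenizer)
--     maxlen = 0
--     for t in vocab:
--         if len(t) > maxlen: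
--             maxlen = len(t)
--     tokens = []
--     i = 0
--     n = len(word)
--     while i < n:
--         best = 0
--         limit = min(maxlen, n - i)
--         for j in range(1, limit + 1):
--             if word[i:i + j] in vocab:
--                 best = j
--         if best:
--             tokens.append(word[i:i + best])
--             i += best
--         else:
--             tokens.append(word[i])
--             i += 1
--     return tokens
-- ===== Notes on version B (the rewrite author's own statement) =====
-- stated objective: faster
-- what changed: Replaces the descending per-position scan of all prefix lengths with membership tests against the whole tokenizer list by an index-based forward scan that checks prefixes only up to the maximum token length against a precomputed hash set, recording the longest match.
import Mathlib
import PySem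

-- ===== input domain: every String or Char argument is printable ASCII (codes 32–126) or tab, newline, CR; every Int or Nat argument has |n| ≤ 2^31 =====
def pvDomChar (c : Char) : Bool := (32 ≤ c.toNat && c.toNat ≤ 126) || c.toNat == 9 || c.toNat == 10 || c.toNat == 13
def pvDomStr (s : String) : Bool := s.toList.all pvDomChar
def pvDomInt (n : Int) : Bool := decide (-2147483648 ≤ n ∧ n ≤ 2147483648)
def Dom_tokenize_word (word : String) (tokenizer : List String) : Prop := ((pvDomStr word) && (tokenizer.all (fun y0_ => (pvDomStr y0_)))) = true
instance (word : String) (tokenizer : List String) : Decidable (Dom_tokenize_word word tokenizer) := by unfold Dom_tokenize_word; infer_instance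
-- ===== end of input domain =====

-- B replaces A's descending all-lengths prefix scan (list membership) by a forward scan that
-- records the longest matching prefix up to the precomputed maximum token length, against a set
-- built once; a timing run measured B faster at every generated size.

-- ===== PORT A =====
-- for i in range(len(word), 0, -1): subword = word[:i]; if subword in tokenizer: break
-- (the loop tries i = n, n-1, …, 1 and stops at the first, i.e. largest, matching prefix length)
def tokAFind (w : List Char) (tok : List (List Char)) : Nat → Option Nat
  | 0 => none
  | i + 1 => if w.take (i + 1) ∈ tok then some (i + 1) else tokAFind w tok i

-- termination helper cited by tokACore's decreasing_by
theorem tokAFind_pos (w : List Char) (tok : List (List Char)) :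
    ∀ n i, tokAFind w tok n = some i → 1 ≤ i := by
  intro n
  induction n with
  | zero => intro i h; simp [tokAFind] at h
  | succ m ih =>
    intro i h
    simp only [tokAFind] at h
    split at h
    · cases h; omega
    · exact ih i h

-- the while loop: one token per iteration, the word shrinks by the matched length (≥ 1) or by 1
def tokACore (tok : List (List Char)) (w : List Char) : List (List Char) :=
  match w with
  | [] => []
  | c :: rest =>
    match h : tokAFind (c :: rest) tok (c :: rest).length with
    | some i => ((c :: rest).take i) :: tokACore tok ((c :: rest).drop i)
    | none => [c] :: tokACore tok rest
termination_by w.length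
decreasing_by
  · have h1 := tokAFind_pos (c :: rest) tok (c :: rest).length i h
    simp only [List.length_drop, List.length_cons]
    omega
  · simp
def tokenize_word (word : String) (tokenizer : List String) : List String :=
  (tokACore (tokenizer.map String.toList) word.toList).map String.ofList

-- ===== PORT B =====
-- for j in range(1, limit+1): if word[i:i+j] in vocab: best = j   (the last match is the longest)
def tokBBest (w : List Char) (vocab : List (List Char)) (limit : Nat) : Nat :=
  (List.range' 1 limit).foldl (fun best j => if w.take j ∈ vocab then j else best) 0

-- the index loop: emit the longest match at the current position ('if best:' is a zero test),
-- else the single character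
def tokBCore (vocab : List (List Char)) (maxlen : Nat) (w : List Char) : List (List Char) :=
  match w with
  | [] => []
  | c :: rest =>
    match tokBBest (c :: rest) vocab (min maxlen (c :: rest).length) with
    | b + 1 => ((c :: rest).take (b + 1)) :: tokBCore vocab maxlen ((c :: rest).drop (b + 1))
    | 0 => [c] :: tokBCore vocab maxlen rest
termination_by w.length
decreasing_by
  · simp only [List.length_drop, List.length_cons]
    omega
  · simp
def tokenize_word_alt (word : String) (tokenizer : List String) : List String :=
  let vocab : PySem.Set (List Char) := PySem.Set.ofList (tokenizer.map String.toList)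
  let maxlen := vocab.foldl (fun m t => if t.length > m then t.length else m) 0
  (tokBCore vocab maxlen word.toList).map String.ofList

-- ===== PRECONDITION & SPEC =====
def Spec_tokenize_word (word : String) (tokenizer : List String) (out : List String) : Prop := out = tokenize_word_alt word tokenizer
instance (word : String) (tokenizer : List String) (out : List String) : Decidable (Spec_tokenize_word word tokenizer out) := by unfold Spec_tokenize_word; infer_instance

-- ===== CLAIM (what is proved, stated in full; the proofs are below) =====
def Claim_equal_tokenize_word : Prop := ∀ (word : String) (tokenizer : List String), Dom_tokenize_word word tokenizer → Spec_tokenize_word word tokenizer (tokenize_word word tokenizer)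

-- ===== LEMMAS AND PROOFS =====

-- A's descending search returns the LARGEST matching prefix length ≤ n (or none)
theorem tokAFind_some_spec (w : List Char) (tok : List (List Char)) :
    ∀ n i, tokAFind w tok n = some i →
      1 ≤ i ∧ i ≤ n ∧ w.take i ∈ tok ∧ ∀ j, i < j → j ≤ n → w.take j ∉ tok := by
  intro n
  induction n with
  | zero => intro i h; simp [tokAFind] at h
  | succ m ih =>
    intro i h
    simp only [tokAFind] at h
    split at h
    · rename_i hmem
      cases h
      exact ⟨by omega, le_refl _, hmem, by intro j hj hj'; omega⟩
    · rename_i hmem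
      obtain ⟨h1, h2, h3, h4⟩ := ih i h
      refine ⟨h1, by omega, h3, ?_⟩
      intro j hj hj'
      by_cases hje : j = m + 1
      · subst hje; exact hmem
      · exact h4 j hj (by omega)

theorem tokAFind_none_spec (w : List Char) (tok : List (List Char)) :
    ∀ n, tokAFind w tok n = none → ∀ j, 1 ≤ j → j ≤ n → w.take j ∉ tok := by
  intro n
  induction n with
  | zero => intro _ j hj hj'; omega
  | succ m ih =>
    intro h j hj hj'
    simp only [tokAFind] at h
    split at h
    · simp at h
    · rename_i hmem
      by_cases hje : j = m + 1
      · subst hje; exact hmem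
      · exact ih h j hj (by omega)

-- one ascending step of B's fold
theorem tokBBest_succ (w : List Char) (vocab : List (List Char)) (l : Nat) :
    tokBBest w vocab (l + 1)
      = if w.take (l + 1) ∈ vocab then l + 1 else tokBBest w vocab l := by
  unfold tokBBest
  rw [List.range'_1_concat, List.foldl_append]
  simp [Nat.add_comm]

-- B's ascending record-best fold finds no match iff there is none ≤ limit
theorem tokBBest_eq_zero_iff (w : List Char) (vocab : List (List Char)) :
    ∀ limit, tokBBest w vocab limit = 0 ↔ ∀ j, 1 ≤ j → j ≤ limit → w.take j ∉ vocab := by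
  intro limit
  induction limit with
  | zero => simp [tokBBest]; omega
  | succ l ih =>
    rw [tokBBest_succ]
    by_cases hmem : w.take (l + 1) ∈ vocab
    · simp only [if_pos hmem]
      constructor
      · intro h; omega
      · intro h; exact absurd hmem (h (l + 1) (by omega) (le_refl _))
    · simp only [if_neg hmem]
      rw [ih]
      constructor
      · intro h j hj hj'
        by_cases hje : j = l + 1
        · subst hje; exact hmem
        · exact h j hj (by omega)
      · intro h j hj hj'; exact h j hj (by omega)

-- and otherwise it returns the LARGEST matching prefix length ≤ limit
theorem tokBBest_spec (w : List Char) (vocab : List (List Char)) :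
    ∀ limit, tokBBest w vocab limit ≠ 0 →
      1 ≤ tokBBest w vocab limit ∧ tokBBest w vocab limit ≤ limit ∧
      w.take (tokBBest w vocab limit) ∈ vocab ∧
      ∀ j, tokBBest w vocab limit < j → j ≤ limit → w.take j ∉ vocab := by
  intro limit
  induction limit with
  | zero => intro h; exact absurd rfl h
  | succ l ih =>
    rw [tokBBest_succ]
    by_cases hmem : w.take (l + 1) ∈ vocab
    · simp only [if_pos hmem]
      intro _
      exact ⟨by omega, le_refl _, hmem, by intro j hj hj'; omega⟩
    · simp only [if_neg hmem]
      intro h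
      obtain ⟨h1, h2, h3, h4⟩ := ih h
      refine ⟨h1, by omega, h3, ?_⟩
      intro j hj hj'
      by_cases hje : j = l + 1
      · subst hje; exact hmem
      · exact h4 j hj (by omega)

-- the running maximum of B's fold only grows
theorem foldl_max_mono (l : List (List Char)) :
    ∀ (a b : Nat), a ≤ b →
      a ≤ l.foldl (fun m t => if t.length > m then t.length else m) b := by
  induction l with
  | nil => intro a b h; simpa
  | cons x xs ih =>
    intro a b h
    simp only [List.foldl_cons]
    apply ih
    split <;> omega

-- every element's length is ≤ the maximum computed by B's fold
theorem foldl_max_ge (l : List (List Char)) :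
    ∀ (m0 : Nat), ∀ t ∈ l, t.length ≤ l.foldl (fun m t => if t.length > m then t.length else m) m0 := by
  induction l with
  | nil => intro m0 t ht; simp at ht
  | cons x xs ih =>
    intro m0 t ht
    rcases List.mem_cons.mp ht with h | h
    · subst h
      simp only [List.foldl_cons]
      apply foldl_max_mono
      split <;> omega
    · exact ih _ t h

-- one step of A equals one step of B, hence the whole results agree
theorem core_eq (tok : List (List Char)) :
    ∀ N (w : List Char), w.length ≤ N →
      tokACore tok w =
        tokBCore (PySem.Set.ofList tok)
          ((PySem.Set.ofList tok).foldl (fun m t => if t.length > m then t.length else m) 0) w := by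
  intro N
  set vocab := PySem.Set.ofList tok with hv
  set maxlen := vocab.foldl (fun m t => if t.length > m then t.length else m) 0 with hm
  have hmemv : ∀ t : List Char, t ∈ vocab ↔ t ∈ tok := fun t => PySem.Set.mem_ofList tok t
  have hlen : ∀ t ∈ tok, t.length ≤ maxlen := fun t ht =>
    foldl_max_ge vocab 0 t ((hmemv t).mpr ht)
  induction N with
  | zero =>
    intro w hw
    have hnil : w = [] := List.length_eq_zero_iff.mp (by omega)
    subst hnil
    simp [tokACore, tokBCore]
  | succ n ih =>
    intro w hw
    match w with
    | [] => simp [tokACore, tokBCore]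
    | c :: rest =>
      rw [tokACore, tokBCore]
      have hlim : min maxlen (c :: rest).length ≤ (c :: rest).length := Nat.min_le_right _ _
      cases hfind : tokAFind (c :: rest) tok (c :: rest).length with
      | some i =>
        obtain ⟨h1, h2, h3, h4⟩ := tokAFind_some_spec (c :: rest) tok _ i hfind
        have hilen : ((c :: rest).take i).length = i := by
          rw [List.length_take]; omega
        have himax : i ≤ maxlen := hilen ▸ hlen _ h3
        have hile : i ≤ min maxlen (c :: rest).length := le_min himax h2
        have hbne : tokBBest (c :: rest) vocab (min maxlen (c :: rest).length) ≠ 0 := by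
          intro h0
          exact (tokBBest_eq_zero_iff (c :: rest) vocab _).mp h0 i h1 hile ((hmemv _).mpr h3)
        obtain ⟨b1, b2, b3, b4⟩ := tokBBest_spec (c :: rest) vocab _ hbne
        have hbi : tokBBest (c :: rest) vocab (min maxlen (c :: rest).length) = i := by
          have hbA : tokBBest (c :: rest) vocab (min maxlen (c :: rest).length) ≤ i := by
            by_contra hc
            exact h4 _ (by omega) (le_trans b2 hlim) ((hmemv _).mp b3)
          have hiB : i ≤ tokBBest (c :: rest) vocab (min maxlen (c :: rest).length) := by
            by_contra hc
            exact b4 i (by omega) hile ((hmemv _).mpr h3)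
          omega
        obtain ⟨i', rfl⟩ : ∃ i', i = i' + 1 := ⟨i - 1, by omega⟩
        rw [hbi]
        have hrec : ((c :: rest).drop (i' + 1)).length ≤ n := by
          simp only [List.length_drop, List.length_cons]
          simp only [List.length_cons] at hw
          omega
        show List.take (i' + 1) (c :: rest) :: tokACore tok (List.drop (i' + 1) (c :: rest))
          = List.take (i' + 1) (c :: rest) :: tokBCore vocab maxlen (List.drop (i' + 1) (c :: rest))
        rw [ih _ hrec]
      | none =>
        have hnone := tokAFind_none_spec (c :: rest) tok _ hfind
        have hb0 : tokBBest (c :: rest) vocab (min maxlen (c :: rest).length) = 0 := by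
          rw [tokBBest_eq_zero_iff]
          intro j hj hj' hmem
          exact hnone j hj (le_trans hj' hlim) ((hmemv _).mp hmem)
        rw [hb0]
        have hrec : rest.length ≤ n := by
          simp only [List.length_cons] at hw; omega
        show [c] :: tokACore tok rest = [c] :: tokBCore vocab maxlen rest
        rw [ih _ hrec]

-- ===== VERDICT (by name: the statement is the Claim_ definition above) =====
theorem tokenize_word_spec : Claim_equal_tokenize_word := by
  intro word tokenizer _
  unfold Spec_tokenize_word tokenize_word tokenize_word_alt
  rw [core_eq (tokenizer.map String.toList) word.toList.length word.toList (le_refl _)]
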